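-- pv_equiv track=rewrite | github.com/qweOkk/vc-dev2 | ASGSR/audio_record/data_sampler.py | generate_speaker_dic
-- ===== SOURCE A (Python) =====
-- def generate_speaker_dic(file_list):
--     '''
--     Args:
--         file_list: a list of files, format of ASVspoof2019,
--              eg: ['PA_0096 PA_T_0005376 ccc - bonafide', 'PA_0098 PA_T_0005397 ccc - bonafide']
--
--
--     Returns:
--         dicionary, key: speaker id, value: a list of AUDIO_FILE_NAME
--
--     '''
--     speaker_dic = {}
--     for file in file_list:
--         speaker_id = file.split(' ')[0]
--         if speaker_id not in speaker_dic:
--             speaker_dic[speaker_id] = []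
--         speaker_dic[speaker_id].append(file.split(' ')[1])
--
--     return speaker_dic
-- ===== SOURCE B (Python) =====
-- def generate_speaker_dic(file_list):
--     key = lambda f: f.split(' ')[0]
--     keys = list(dict.fromkeys(key(f) for f in file_list))
--     return {k: [f.split(' ')[1] for f in file_list if key(f) == k]
--             for k in keys}
-- ===== Notes on version B (the rewrite author's own statement) =====
-- stated objective: alternative
-- what changed: Replaces the single hash-accumulation pass (create-empty-list-then-append per file) with a two-phase decomposition: first an ordered dedup of speaker ids via dict.fromkeys, then a dict comprehension that builds each speaker's file list by a filtered scan of the input.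
import Mathlib
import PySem

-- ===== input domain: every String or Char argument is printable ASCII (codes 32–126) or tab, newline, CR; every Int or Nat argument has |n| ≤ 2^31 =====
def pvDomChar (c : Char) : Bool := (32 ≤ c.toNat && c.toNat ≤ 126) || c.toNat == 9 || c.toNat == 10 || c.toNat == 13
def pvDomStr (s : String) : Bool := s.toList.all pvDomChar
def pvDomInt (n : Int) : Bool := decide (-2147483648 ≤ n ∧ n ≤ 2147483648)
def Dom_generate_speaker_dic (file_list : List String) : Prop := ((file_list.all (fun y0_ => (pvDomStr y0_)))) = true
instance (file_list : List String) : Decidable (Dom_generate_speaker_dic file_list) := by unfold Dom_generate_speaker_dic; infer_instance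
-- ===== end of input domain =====

-- B replaces A's single hash-accumulation pass by an ordered dedup of speaker ids
-- followed by a per-speaker filtered scan (alternative decomposition, same results).


-- ===== PORT A =====
-- loop body of A: file.split(' ')[0]; if missing, insert []; then append file.split(' ')[1].
-- split? is exact for sep = " " (never none); pyGetD … 1 "" is exact under Pre_ (index 1 in range).
def speakerStep (speaker_dic : PySem.Dict String (List String)) (file : String) :
    PySem.Dict String (List String) :=
  let speaker_id := PySem.List.pyGetD ((PySem.Str.split? file " ").getD []) 0 ""
  let speaker_dic :=
    if speaker_dic.contains speaker_id then speaker_dic else speaker_dic.insert speaker_id []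
  speaker_dic.modify speaker_id []
    (fun v => v ++ [PySem.List.pyGetD ((PySem.Str.split? file " ").getD []) 1 ""])

def generate_speaker_dic (file_list : List String) : List (String × List String) :=
  (file_list.foldl speakerStep PySem.Dict.empty).items

-- ===== PORT B =====
def generate_speaker_dic_alt (file_list : List String) : List (String × List String) :=
  (PySem.List.dedup
      (file_list.map (fun f => PySem.List.pyGetD ((PySem.Str.split? f " ").getD []) 0 ""))).map
    (fun k =>
      (k, (file_list.filter
              (fun f => PySem.List.pyGetD ((PySem.Str.split? f " ").getD []) 0 "" == k)).map
            (fun f => PySem.List.pyGetD ((PySem.Str.split? f " ").getD []) 1 "")))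

-- ===== PRECONDITION & SPEC =====
-- Python A raises IndexError on file.split(' ')[1] when a file has fewer than two
-- space-separated tokens; exactly those inputs are excluded.
def Pre_generate_speaker_dic (file_list : List String) : Prop :=
  ∀ f ∈ file_list, 2 ≤ ((PySem.Str.split? f " ").getD []).length
instance (file_list : List String) : Decidable (Pre_generate_speaker_dic file_list) := by
  unfold Pre_generate_speaker_dic; infer_instance

def pvWitness_generate_speaker_dic : List String :=
  ["PA_0096 PA_T_0005376 ccc - bonafide", "PA_0098 PA_T_0005397 ccc - bonafide",
   "PA_0096 PA_T_0000001 ccc - spoof"]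

def Spec_generate_speaker_dic (file_list : List String) (out : List (String × List String)) : Prop := out = generate_speaker_dic_alt file_list
instance (file_list : List String) (out : List (String × List String)) : Decidable (Spec_generate_speaker_dic file_list out) := by unfold Spec_generate_speaker_dic; infer_instance

-- ===== CLAIM (what is proved, stated in full; the proofs are below) =====
def Claim_equal_generate_speaker_dic : Prop := ∀ (file_list : List String), Dom_generate_speaker_dic file_list → Pre_generate_speaker_dic file_list → Spec_generate_speaker_dic file_list (generate_speaker_dic file_list)

-- ===== LEMMAS AND PROOFS =====

-- the speaker id and the audio-file name of one line (proof-side abbreviations)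
def pvSid (f : String) : String := PySem.List.pyGetD ((PySem.Str.split? f " ").getD []) 0 ""
def pvTok (f : String) : String := PySem.List.pyGetD ((PySem.Str.split? f " ").getD []) 1 ""

-- A's guarded loop body is exactly a modify with default []
theorem speakerStep_eq_modify (d : PySem.Dict String (List String)) (f : String) :
    speakerStep d f = d.modify (pvSid f) [] (fun v => v ++ [pvTok f]) := by
  unfold speakerStep pvSid pvTok
  by_cases h : d.contains (PySem.List.pyGetD ((PySem.Str.split? f " ").getD []) 0 "") = true
  · simp [h]
  · simp only [Bool.not_eq_true] at h
    simp only [h, Bool.false_eq_true, if_false]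
    unfold PySem.Dict.modify
    rw [PySem.Dict.getD_insert_self, PySem.Dict.getD_of_not_contains _ _ h,
        PySem.Dict.insert_insert_self]

theorem foldl_speakerStep (l : List String) (d : PySem.Dict String (List String)) :
    l.foldl speakerStep d
      = (l.map (fun f => (pvSid f, pvTok f))).foldl
          (fun d p => d.modify p.1 [] (fun v => v ++ [p.2])) d := by
  induction l generalizing d with
  | nil => rfl
  | cons f l ih => simp [List.foldl_cons, speakerStep_eq_modify, ih]

-- ===== VERDICT (by name: the statement is the Claim_ definition above) =====
theorem generate_speaker_dic_spec : Claim_equal_generate_speaker_dic := by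
  intro l _ _
  unfold Spec_generate_speaker_dic generate_speaker_dic generate_speaker_dic_alt
  rw [foldl_speakerStep]
  set pf : String → String × String := fun f => (pvSid f, pvTok f) with hpf
  have hkeys : ((l.map pf).foldl (fun d p => d.modify p.1 [] (fun v => v ++ [p.2]))
      PySem.Dict.empty).keys = PySem.List.dedup (l.map pvSid) := by
    rw [show (fun (d : PySem.Dict String (List String)) (p : String × String) =>
          d.modify p.1 [] (fun v => v ++ [p.2]))
        = (fun d p => d.modify (Prod.fst p) [] ((fun (_ : PySem.Dict String (List String))
            (p : String × String) (v : List String) => v ++ [p.2]) d p)) from rfl]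
    rw [PySem.Dict.keys_foldl_modify_key]
    simp [PySem.Set.update, PySem.Set.ofList, PySem.List.dedup_eq_ofList, hpf,
      List.map_map, Function.comp_def]
  have hnodup : ((l.map pf).foldl (fun d p => d.modify p.1 [] (fun v => v ++ [p.2]))
      PySem.Dict.empty).keys.Nodup := by
    rw [hkeys]; exact PySem.List.nodup_dedup _
  rw [PySem.Dict.items_eq_map_keys _ hnodup []]
  rw [hkeys]
  have hmapkey : l.map (fun f => PySem.List.pyGetD ((PySem.Str.split? f " ").getD []) 0 "")
      = l.map pvSid := rfl
  rw [hmapkey]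
  apply List.map_congr_left
  intro k _
  rw [PySem.Dict.getD_foldl_modify_append]
  simp only [PySem.Dict.getD_empty, List.nil_append, List.filter_map, List.map_map]
  simp [hpf, Function.comp_def, pvSid, pvTok]
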